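-- pv_equiv track=rewrite | github.com/NAME0x0/AVA | src/core/verification.py | _contains_code
-- ===== SOURCE A (Python) =====
-- def _contains_code(text: str) -> bool:
--     """Check if text contains code blocks."""
--     code_indicators = [
--         "```",
--         "def ",
--         "class ",
--         "import ",
--         "function ",
--         "const ",
--         "let ",
--         "var ",
--         "return ",
--         "if (",
--         "for (",
--         "while (",
--     ]
--     return any(indicator in text for indicator in code_indicators)
-- ===== SOURCE B (Python) =====
-- def _contains_code(text: str) -> bool:
--     """Check if text contains code blocks (single left-to-right scan)."""
--     code_indicators = (
--         "```",
--         "def ",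
--         "class ",
--         "import ",
--         "function ",
--         "const ",
--         "let ",
--         "var ",
--         "return ",
--         "if (",
--         "for (",
--         "while (",
--     )
--     return any(
--         text.startswith(indicator, i)
--         for i in range(len(text) + 1)
--         for indicator in code_indicators
--     )
-- ===== Notes on version B (the rewrite author's own statement) =====
-- stated objective: alternative
-- what changed: A runs twelve independent substring-membership scans over the text; B makes a single left-to-right pass over the text positions, testing at each position whether any indicator starts there via startswith with an offset.
import Mathlib
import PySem

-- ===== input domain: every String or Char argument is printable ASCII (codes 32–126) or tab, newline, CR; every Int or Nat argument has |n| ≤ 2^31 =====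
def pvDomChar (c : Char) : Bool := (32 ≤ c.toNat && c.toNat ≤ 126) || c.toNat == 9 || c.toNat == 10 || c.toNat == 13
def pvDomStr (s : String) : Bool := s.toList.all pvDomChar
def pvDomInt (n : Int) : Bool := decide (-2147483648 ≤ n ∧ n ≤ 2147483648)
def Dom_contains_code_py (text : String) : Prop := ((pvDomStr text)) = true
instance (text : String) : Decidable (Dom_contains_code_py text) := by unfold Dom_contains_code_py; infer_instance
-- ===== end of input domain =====

-- B changes the traversal, not the answer: one left-to-right scan instead of twelve substring searches (objective: alternative).

-- ===== PORT A =====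
-- A: any(indicator in text for indicator in code_indicators) — twelve membership tests.
def pvCodeIndicators : List String :=
  ["```", "def ", "class ", "import ", "function ", "const ", "let ", "var ",
   "return ", "if (", "for (", "while ("]

def contains_code_py (text : String) : Bool :=
  pvCodeIndicators.any (fun indicator => PySem.Str.isIn indicator text)

-- ===== PORT B =====
-- B: one pass over the positions of text; at each suffix, test whether some indicator starts there.
def pvAltIndicators : List (List Char) :=
  ["```".toList, "def ".toList, "class ".toList, "import ".toList, "function ".toList,
   "const ".toList, "let ".toList, "var ".toList, "return ".toList, "if (".toList,
   "for (".toList, "while (".toList]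

def pvScan (cs : List Char) : Bool :=
  (pvAltIndicators.any (fun ind => ind.isPrefixOf cs)) ||
    (match cs with
     | [] => false
     | _ :: rest => pvScan rest)

def contains_code_py_alt (text : String) : Bool := pvScan text.toList

-- ===== PRECONDITION & SPEC =====
def Spec_contains_code_py (text : String) (out : Bool) : Prop := out = contains_code_py_alt text
instance (text : String) (out : Bool) : Decidable (Spec_contains_code_py text out) := by unfold Spec_contains_code_py; infer_instance

-- ===== CLAIM (what is proved, stated in full; the proofs are below) =====
def Claim_equal_contains_code_py : Prop := ∀ (text : String), Dom_contains_code_py text → Spec_contains_code_py text (contains_code_py text)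

-- ===== LEMMAS AND PROOFS =====
theorem pvScan_iff (cs : List Char) :
    pvScan cs = true ↔ ∃ ind ∈ pvAltIndicators, ind <:+: cs := by
  induction cs with
  | nil =>
      rw [pvScan]
      simp [List.any_eq_true, List.isPrefixOf_iff_prefix]
  | cons c rest ih =>
      rw [pvScan]
      simp only [Bool.or_eq_true, List.any_eq_true, List.isPrefixOf_iff_prefix, ih,
        List.infix_cons_iff]
      constructor
      · rintro (⟨i, hi, hp⟩ | ⟨i, hi, hs⟩)
        · exact ⟨i, hi, Or.inl hp⟩
        · exact ⟨i, hi, Or.inr hs⟩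
      · rintro ⟨i, hi, hp | hs⟩
        · exact Or.inl ⟨i, hi, hp⟩
        · exact Or.inr ⟨i, hi, hs⟩

theorem pvAlt_mem_iff (ind : List Char) :
    ind ∈ pvAltIndicators ↔ ∃ s ∈ pvCodeIndicators, s.toList = ind := by
  constructor
  · intro h
    fin_cases h <;> exact ⟨_, by decide, rfl⟩
  · rintro ⟨s, hs, rfl⟩
    fin_cases hs <;> decide

-- ===== VERDICT (by name: the statement is the Claim_ definition above) =====
theorem contains_code_py_spec : Claim_equal_contains_code_py := by
  intro text _
  unfold Spec_contains_code_py contains_code_py contains_code_py_alt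
  rcases h : pvScan text.toList with hf | ht
  · rw [Bool.eq_false_iff]
    intro hA
    rw [List.any_eq_true] at hA
    obtain ⟨s, hs, hin⟩ := hA
    rw [PySem.Str.isIn_iff_infix] at hin
    have : pvScan text.toList = true :=
      (pvScan_iff _).mpr ⟨s.toList, (pvAlt_mem_iff _).mpr ⟨s, hs, rfl⟩, hin⟩
    simp [h] at this
  · obtain ⟨ind, hind, hinf⟩ := (pvScan_iff _).mp h
    obtain ⟨s, hs, rfl⟩ := (pvAlt_mem_iff _).mp hind
    rw [List.any_eq_true]
    exact ⟨s, hs, (PySem.Str.isIn_iff_infix _ _).mpr hinf⟩
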